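-- pv_equiv track=rewrite | github.com/Chinjuku/PSCP-Python | Week 8-9/solar.py | get_star
-- ===== SOURCE A (Python) =====
-- def get_star(solar, want_pos):
--     "get name star"
--     planet = ""
--     position = 0
--     for i in solar:
--         if i != " ":
--             planet += i
--         else:
--             position += 1
--             if position == want_pos:
--                 return planet
--             else:
--                 planet = ""
-- ===== SOURCE B (Python) =====
-- def get_star(solar, want_pos):
--     "get name star"
--     parts = solar.split(" ")
--     if 1 <= want_pos < len(parts):
--         return parts[want_pos - 1]
-- ===== Notes on version B (the rewrite author's own statement) =====
-- stated objective: simpler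
-- what changed: Replaced A's streaming character scan with a word accumulator, space counter and early return by a single split on " " followed by a direct bounds-checked index parts[want_pos-1] (the last token, not followed by a space, is never returned).
import Mathlib
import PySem

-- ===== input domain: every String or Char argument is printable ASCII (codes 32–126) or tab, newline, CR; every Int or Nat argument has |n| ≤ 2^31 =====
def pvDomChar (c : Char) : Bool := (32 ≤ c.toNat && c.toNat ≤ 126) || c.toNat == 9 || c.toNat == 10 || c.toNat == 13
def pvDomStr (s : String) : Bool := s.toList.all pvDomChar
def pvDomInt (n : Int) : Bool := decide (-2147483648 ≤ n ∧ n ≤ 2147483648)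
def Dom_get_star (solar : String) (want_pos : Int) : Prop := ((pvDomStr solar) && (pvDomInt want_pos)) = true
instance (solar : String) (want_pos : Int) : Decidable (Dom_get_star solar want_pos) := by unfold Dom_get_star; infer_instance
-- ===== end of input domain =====

-- B replaces A's streaming character scan (accumulator + space counter + early return)
-- by tokenize-once-then-index: split on " " and index directly under a bounds guard; objective: simpler.

-- ===== PORT A =====
-- A's for-loop over the characters, with its early return, as structural recursion
-- over the same state (planet, position)
def get_star_loop (cs : List Char) (planet : List Char) (position : Int) (want_pos : Int) :
    Option String :=
  match cs with
  | [] => none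
  | i :: rest =>
    if i ≠ ' ' then
      get_star_loop rest (planet ++ [i]) position want_pos
    else
      if position + 1 = want_pos then some (String.ofList planet)
      else get_star_loop rest [] (position + 1) want_pos

def get_star (solar : String) (want_pos : Int) : Option String :=
  get_star_loop solar.toList [] 0 want_pos

-- ===== PORT B =====
-- parts = solar.split(" "); if 1 <= want_pos < len(parts): return parts[want_pos - 1]
def get_star_alt (solar : String) (want_pos : Int) : Option String :=
  let parts := PySem.Chars.splitOn solar.toList [' ']
  if 1 ≤ want_pos ∧ want_pos < (parts.length : Int) then
    (PySem.List.pyGet? parts (want_pos - 1)).map String.ofList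
  else none

-- ===== PRECONDITION & SPEC =====
def Spec_get_star (solar : String) (want_pos : Int) (out : Option String) : Prop := out = get_star_alt solar want_pos
instance (solar : String) (want_pos : Int) (out : Option String) : Decidable (Spec_get_star solar want_pos out) := by unfold Spec_get_star; infer_instance

-- ===== CLAIM (what is proved, stated in full; the proofs are below) =====
def Claim_equal_get_star : Prop := ∀ (solar : String) (want_pos : Int), Dom_get_star solar want_pos → Spec_get_star solar want_pos (get_star solar want_pos)

-- ===== LEMMAS AND PROOFS =====

-- single-separator split, as direct structural recursion (proof helper)
def spWords : List Char → List (List Char)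
  | [] => [[]]
  | c :: rest =>
    if c = ' ' then [] :: spWords rest
    else
      match spWords rest with
      | [] => [[c]]
      | w :: ws => (c :: w) :: ws

theorem spWords_ne_nil (cs : List Char) : spWords cs ≠ [] := by
  cases cs with
  | nil => simp [spWords]
  | cons c rest =>
    simp only [spWords]
    split
    · simp
    · cases h : spWords rest <;> simp

theorem go_eq (fuel : Nat) :
    ∀ (l cur : List Char) (acc : List (List Char)), l.length < fuel →
      PySem.Chars.splitOn.go [' '] fuel l cur acc =
        acc.reverse ++
          (match spWords l with
           | [] => [cur.reverse]
           | w :: ws => (cur.reverse ++ w) :: ws) := by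
  induction fuel with
  | zero => intro l cur acc h; omega
  | succ f ih =>
    intro l cur acc h
    cases l with
    | nil =>
      simp [PySem.Chars.splitOn.go, spWords]
    | cons c rest =>
      by_cases hc : c = ' '
      · subst hc
        rw [show PySem.Chars.splitOn.go [' '] (f+1) (' '::rest) cur acc
              = PySem.Chars.splitOn.go [' '] f rest [] (cur.reverse :: acc) from by
            simp [PySem.Chars.splitOn.go, List.isPrefixOf]]
        rw [ih rest [] (cur.reverse :: acc) (by simpa using Nat.lt_of_succ_lt_succ h)]
        cases hs : spWords rest with
        | nil => exact absurd hs (spWords_ne_nil rest)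
        | cons w ws => simp [spWords, hs]
      · rw [show PySem.Chars.splitOn.go [' '] (f+1) (c::rest) cur acc
              = PySem.Chars.splitOn.go [' '] f rest (c :: cur) acc from by
            have h' : (' ' == c) = false := by simpa using Ne.symm hc
            simp [PySem.Chars.splitOn.go, List.isPrefixOf, h']]
        rw [ih rest (c :: cur) acc (by simpa using Nat.lt_of_succ_lt_succ h)]
        cases hs : spWords rest with
        | nil => exact absurd hs (spWords_ne_nil rest)
        | cons w ws => simp [spWords, hs, hc]

theorem splitOn_eq_spWords (cs : List Char) :
    PySem.Chars.splitOn cs [' '] = spWords cs := by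
  rw [show PySem.Chars.splitOn cs [' '] = PySem.Chars.splitOn.go [' '] (cs.length+1) cs [] [] from rfl]
  rw [go_eq (cs.length+1) cs [] [] (by omega)]
  cases hs : spWords cs with
  | nil => exact absurd hs (spWords_ne_nil cs)
  | cons w ws => simp

def wfind : List (List Char) → Int → Option (List Char)
  | [], _ => none
  | [_], _ => none
  | w :: ws, k => if k = 1 then some w else wfind ws (k - 1)

theorem loop_eq_wfind (cs : List Char) :
    ∀ (planet : List Char) (position want_pos : Int),
      get_star_loop cs planet position want_pos =
        (wfind (match spWords cs with
                | [] => [planet]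
                | w :: ws => (planet ++ w) :: ws) (want_pos - position)).map String.ofList := by
  induction cs with
  | nil => intro planet p w; simp [get_star_loop, spWords, wfind]
  | cons c rest ih =>
    intro planet p w
    by_cases hc : c = ' '
    · subst hc
      rw [show get_star_loop (' ' :: rest) planet p w
            = if p + 1 = w then some (String.ofList planet) else get_star_loop rest [] (p + 1) w from by
          simp [get_star_loop]]
      rw [show spWords (' ' :: rest) = [] :: spWords rest from by simp [spWords]]
      cases hs : spWords rest with
      | nil => exact absurd hs (spWords_ne_nil rest)
      | cons hw tl =>
        by_cases hw1 : p + 1 = w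
        · rw [if_pos hw1]
          simp [wfind, show w - p = 1 from by omega]
        · rw [if_neg hw1, ih [] (p + 1) w, hs]
          simp [wfind, show ¬ (w - p = 1) from by omega,
                show w - (p + 1) = w - p - 1 from by ring]
    · cases hs : spWords rest with
      | nil => exact absurd hs (spWords_ne_nil rest)
      | cons hw tl =>
        rw [show get_star_loop (c :: rest) planet p w
              = get_star_loop rest (planet ++ [c]) p w from by simp [get_star_loop, hc]]
        rw [ih (planet ++ [c]) p w, hs]
        rw [show spWords (c :: rest) = (c :: hw) :: tl from by simp [spWords, hc, hs]]
        simp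

theorem wfind_eq_guarded (parts : List (List Char)) :
    ∀ (k : Int),
      wfind parts k =
        if 1 ≤ k ∧ k < (parts.length : Int) then PySem.List.pyGet? parts (k - 1) else none := by
  induction parts with
  | nil => intro k; simp [wfind]; intro h1 h2; omega
  | cons w ws ih =>
    intro k
    cases ws with
    | nil =>
      rw [show wfind [w] k = none from by simp [wfind]]
      rw [if_neg (by simp only [List.length_cons, List.length_nil]; push_cast; omega)]
    | cons x xs =>
      by_cases hk : k = 1
      · subst hk
        rw [show wfind (w :: x :: xs) 1 = some w from by simp [wfind]]
        rw [if_pos (by constructor; · omega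
                       · simp only [List.length_cons]; push_cast; omega)]
        simp [PySem.List.pyGet?_zero_cons]
      · rw [show wfind (w :: x :: xs) k = wfind (x :: xs) (k - 1) from by simp [wfind, hk]]
        rw [ih (k - 1)]
        by_cases hk2 : 1 ≤ k - 1 ∧ k - 1 < ((x :: xs).length : Int)
        · have hk2' := hk2
          simp only [List.length_cons] at hk2'
          push_cast at hk2'
          rw [if_pos hk2, if_pos (by simp only [List.length_cons]; push_cast; omega)]
          rw [PySem.List.pyGet?_of_nonneg _ (by omega : (0:Int) ≤ k - 1 - 1)]
          rw [PySem.List.pyGet?_of_nonneg _ (by omega : (0:Int) ≤ k - 1)]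
          rw [show (k - 1).toNat = (k - 1 - 1).toNat + 1 from by omega]
          simp
        · have hk2' : ¬ (1 ≤ k - 1 ∧ k - 1 < ((x :: xs).length : Int)) := hk2
          simp only [List.length_cons] at hk2'
          push_cast at hk2'
          rw [if_neg hk2, if_neg (by simp only [List.length_cons]; push_cast; omega)]

-- ===== VERDICT (by name: the statement is the Claim_ definition above) =====
theorem get_star_spec : Claim_equal_get_star := by
  intro solar want_pos _
  unfold Spec_get_star get_star get_star_alt
  rw [loop_eq_wfind, splitOn_eq_spWords]
  cases hs : spWords solar.toList with
  | nil => exact absurd hs (spWords_ne_nil solar.toList)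
  | cons w ws =>
    simp only [List.nil_append, sub_zero, wfind_eq_guarded]
    split <;> simp
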